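-- pv_equiv track=rewrite | github.com/weiazm/crawler | src/user/statisticForUser.py | getReplySelf
-- ===== SOURCE A (Python) =====
-- def getReplySelf(contents):
--     result = 0
--     bbs_id_list = []
--     for content in contents:
--         if content[4] == 0:
--             bbs_id_list.append(content[2])
--     bbs_id_list = set(bbs_id_list)
--     for content in contents:
--         if content[4] != 0:
--             if content[2] in bbs_id_list:
--                 result += 1
--     return result
-- ===== SOURCE B (Python) =====
-- def getReplySelf(contents):
--     return sum(1 for c in contents
--                if c[4] != 0 and any(d[4] == 0 and d[2] == c[2] for d in contents))
-- ===== Notes on version B (the rewrite author's own statement) =====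
-- stated objective: alternative
-- what changed: Drops A's precomputed set of self-post ids entirely: B is a single comprehension that counts each reply row iff an inner existential scan finds some row that is a self-post with the same id (nested scan instead of a materialised set, trading O(n) for O(n^2)).
import Mathlib
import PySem

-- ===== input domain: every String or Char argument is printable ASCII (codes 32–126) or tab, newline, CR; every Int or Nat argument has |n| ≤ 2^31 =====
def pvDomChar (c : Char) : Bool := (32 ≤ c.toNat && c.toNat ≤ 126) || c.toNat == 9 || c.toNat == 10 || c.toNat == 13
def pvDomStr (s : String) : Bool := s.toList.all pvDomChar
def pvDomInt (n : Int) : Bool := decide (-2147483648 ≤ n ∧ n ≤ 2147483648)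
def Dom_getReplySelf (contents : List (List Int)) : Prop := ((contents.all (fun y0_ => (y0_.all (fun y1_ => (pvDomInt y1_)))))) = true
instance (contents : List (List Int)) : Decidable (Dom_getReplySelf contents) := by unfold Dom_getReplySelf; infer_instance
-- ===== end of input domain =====

-- B drops A's materialised set of self-post ids: it counts, in one comprehension, each
-- reply row for which an inner existential scan finds a self-post row with the same id.
-- ===== PORT A =====
def getReplySelf (contents : List (List Int)) : Int :=
  let bbs : List Int := contents.foldl
    (fun acc c =>
      if PySem.List.pyGetD c 4 0 = 0 then acc ++ [PySem.List.pyGetD c 2 0] else acc) []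
  let s : PySem.Set Int := PySem.Set.ofList bbs
  contents.foldl
    (fun r c =>
      if PySem.List.pyGetD c 4 0 ≠ 0 then
        if PySem.Set.contains s (PySem.List.pyGetD c 2 0) then r + 1 else r
      else r) 0

-- ===== PORT B =====
def getReplySelf_alt (contents : List (List Int)) : Int :=
  contents.foldl
    (fun r c =>
      if PySem.List.pyGetD c 4 0 ≠ 0 ∧
          contents.any (fun d =>
            PySem.List.pyGetD d 4 0 == 0 &&
            PySem.List.pyGetD d 2 0 == PySem.List.pyGetD c 2 0) then
        r + 1
      else r) 0

-- ===== PRECONDITION & SPEC =====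
-- Pre_ excludes exactly the inputs on which A raises IndexError: a row shorter than 5.
def Pre_getReplySelf (contents : List (List Int)) : Prop :=
  ∀ c ∈ contents, 5 ≤ c.length
instance (contents : List (List Int)) : Decidable (Pre_getReplySelf contents) := by
  unfold Pre_getReplySelf; infer_instance
def pvWitness_getReplySelf : List (List Int) := [[0,0,1,0,0],[0,0,1,0,2]]
def Spec_getReplySelf (contents : List (List Int)) (out : Int) : Prop := out = getReplySelf_alt contents
instance (contents : List (List Int)) (out : Int) : Decidable (Spec_getReplySelf contents out) := by unfold Spec_getReplySelf; infer_instance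

-- ===== CLAIM (what is proved, stated in full; the proofs are below) =====
def Claim_equal_getReplySelf : Prop := ∀ (contents : List (List Int)), Dom_getReplySelf contents → Pre_getReplySelf contents → Spec_getReplySelf contents (getReplySelf contents)

-- ===== LEMMAS AND PROOFS =====

-- A's set of self-post ids contains k exactly when B's inner scan over contents succeeds.
lemma contains_eq_any (contents : List (List Int)) (k : Int) :
    PySem.Set.contains
      (PySem.Set.ofList
        ((contents.filter (fun c => PySem.List.pyGetD c 4 0 == 0)).map
          (fun c => PySem.List.pyGetD c 2 0))) k
      = contents.any (fun d =>
          PySem.List.pyGetD d 4 0 == 0 && PySem.List.pyGetD d 2 0 == k) := by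
  by_cases h : ∃ d ∈ contents, PySem.List.pyGetD d 4 0 = 0 ∧ PySem.List.pyGetD d 2 0 = k
  · obtain ⟨d, hd, h4, h2⟩ := h
    have h1 : PySem.Set.contains
        (PySem.Set.ofList
          ((contents.filter (fun c => PySem.List.pyGetD c 4 0 == 0)).map
            (fun c => PySem.List.pyGetD c 2 0))) k = true := by
      rw [PySem.Set.contains_iff, PySem.Set.mem_ofList, List.mem_map]
      exact ⟨d, List.mem_filter.mpr ⟨hd, by simp [h4]⟩, h2⟩
    have h2' : contents.any (fun d =>
        PySem.List.pyGetD d 4 0 == 0 && PySem.List.pyGetD d 2 0 == k) = true := by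
      rw [List.any_eq_true]
      exact ⟨d, hd, by simp [h4, h2]⟩
    rw [h1, h2']
  · have h1 : PySem.Set.contains
        (PySem.Set.ofList
          ((contents.filter (fun c => PySem.List.pyGetD c 4 0 == 0)).map
            (fun c => PySem.List.pyGetD c 2 0))) k = false := by
      rw [Bool.eq_false_iff]
      intro hc
      rw [PySem.Set.contains_iff, PySem.Set.mem_ofList, List.mem_map] at hc
      obtain ⟨d, hdf, h2⟩ := hc
      have := List.mem_filter.mp hdf
      exact h ⟨d, this.1, by simpa using this.2, h2⟩
    have h2' : contents.any (fun d =>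
        PySem.List.pyGetD d 4 0 == 0 && PySem.List.pyGetD d 2 0 == k) = false := by
      rw [Bool.eq_false_iff]
      intro hc
      rw [List.any_eq_true] at hc
      obtain ⟨d, hd, hdd⟩ := hc
      simp only [Bool.and_eq_true, beq_iff_eq] at hdd
      exact h ⟨d, hd, hdd.1, hdd.2⟩
    rw [h1, h2']

-- ===== VERDICT (by name: the statement is the Claim_ definition above) =====
theorem getReplySelf_spec : Claim_equal_getReplySelf := by
  intro contents _ _
  unfold Spec_getReplySelf getReplySelf getReplySelf_alt
  simp only
  have hbbs : contents.foldl
      (fun acc c =>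
        if PySem.List.pyGetD c 4 0 = 0 then acc ++ [PySem.List.pyGetD c 2 0] else acc) []
      = (contents.filter (fun c => PySem.List.pyGetD c 4 0 == 0)).map
          (fun c => PySem.List.pyGetD c 2 0) := by
    rw [PySem.List.foldl_congr_mem _ _
          (fun acc c =>
            if (PySem.List.pyGetD c 4 0 == 0) then acc ++ [PySem.List.pyGetD c 2 0] else acc) []
          (by
            intro acc c _
            by_cases h : PySem.List.pyGetD c 4 0 = 0 <;> simp [h])]
    rw [PySem.List.foldl_append_if]
    simp
  rw [hbbs]
  have hf : (fun (r : Int) (c : List Int) =>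
      if PySem.List.pyGetD c 4 0 ≠ 0 then
        if PySem.Set.contains
            (PySem.Set.ofList
              ((contents.filter (fun c => PySem.List.pyGetD c 4 0 == 0)).map
                (fun c => PySem.List.pyGetD c 2 0))) (PySem.List.pyGetD c 2 0)
        then r + 1 else r
      else r)
      = (fun (r : Int) (c : List Int) =>
      if PySem.List.pyGetD c 4 0 ≠ 0 ∧
          contents.any (fun d =>
            PySem.List.pyGetD d 4 0 == 0 &&
            PySem.List.pyGetD d 2 0 == PySem.List.pyGetD c 2 0) then
        r + 1
      else r) := by
    funext r c
    rw [contains_eq_any contents (PySem.List.pyGetD c 2 0)]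
    by_cases h4 : PySem.List.pyGetD c 4 0 = 0 <;>
      by_cases ha : contents.any (fun d =>
          PySem.List.pyGetD d 4 0 == 0 &&
          PySem.List.pyGetD d 2 0 == PySem.List.pyGetD c 2 0) = true <;>
      simp [h4, ha]
  rw [hf]
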